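-- pv_equiv track=rewrite | github.com/joaquinmartis/TP3_teoria_de_la_informacion | TP3.py | descomprimir
-- ===== SOURCE A (Python) =====
-- def descomprimir(bits_comprimidos, diccionario_codigos):
--     texto_descomprimido = ''
--     codigo_actual = ''
--     for bit in bits_comprimidos:
--         codigo_actual += bit
--         for caracter, codigo in diccionario_codigos.items():
--             if codigo == codigo_actual:
--                 texto_descomprimido += caracter
--                 codigo_actual = ''
--                 break
--     return texto_descomprimido
-- ===== SOURCE B (Python) =====
-- def descomprimir(bits_comprimidos, diccionario_codigos):
--     # Greedy shortest-prefix decoding by position jumps: at each position take the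
--     # shortest code that matches, jump past it; probe only code lengths that occur.
--     inverso = {}
--     for caracter, codigo in diccionario_codigos.items():
--         if codigo and codigo not in inverso:
--             inverso[codigo] = caracter
--     max_len = 0
--     for codigo in inverso:
--         if len(codigo) > max_len:
--             max_len = len(codigo)
--     longitudes_presentes = {len(codigo) for codigo in inverso}
--     longitudes = [l for l in range(1, max_len + 1) if l in longitudes_presentes]
--     salida = []
--     i, n = 0, len(bits_comprimidos)
--     while i < n:
--         encontrado = None
--         for l in longitudes:
--             if i + l <= n:
--                 caracter = inverso.get(bits_comprimidos[i:i + l])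
--                 if caracter is not None:
--                     encontrado = (l, caracter)
--                     break
--         if encontrado is None:
--             break
--         salida.append(encontrado[1])
--         i += encontrado[0]
--     return ''.join(salida)
-- ===== Notes on version B (the rewrite author's own statement) =====
-- stated objective: faster
-- what changed: B decodes by greedy shortest-prefix position jumps over the bitstring: it builds a reverse code->char map and the ascending list of code lengths that occur, and at each position probes only those lengths against a slice and jumps past the matched code (stopping early when nothing can match), instead of A's bit-by-bit buffer growth with a full linear scan of the dictionary after every single bit.
import Mathlib
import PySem

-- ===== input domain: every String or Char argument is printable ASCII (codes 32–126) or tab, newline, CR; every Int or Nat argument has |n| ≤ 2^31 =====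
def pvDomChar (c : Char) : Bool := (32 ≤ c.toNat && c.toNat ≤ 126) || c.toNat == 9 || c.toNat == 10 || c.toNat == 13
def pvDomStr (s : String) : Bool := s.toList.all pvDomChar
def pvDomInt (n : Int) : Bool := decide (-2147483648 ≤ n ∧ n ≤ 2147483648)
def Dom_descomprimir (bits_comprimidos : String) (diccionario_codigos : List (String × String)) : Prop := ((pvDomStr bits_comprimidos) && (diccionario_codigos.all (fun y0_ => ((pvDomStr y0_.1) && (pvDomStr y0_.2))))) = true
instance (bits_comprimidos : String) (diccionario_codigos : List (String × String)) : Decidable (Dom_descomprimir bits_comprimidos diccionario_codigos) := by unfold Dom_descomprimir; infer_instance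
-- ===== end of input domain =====

-- B replaces A's bit-by-bit buffer with a full dictionary scan per bit by greedy
-- shortest-prefix position jumps probing only the code lengths that occur; objective: faster.

-- ===== PORT A =====
-- inner 'for caracter, codigo in diccionario_codigos.items(): if codigo == codigo_actual: … break'
def pvBuscarA (c : String) : List (String × String) → Option String
  | [] => none
  | (caracter, codigo) :: resto =>
      if codigo == c then some caracter else pvBuscarA c resto

def pvPasoA (dicc : List (String × String)) (st : String × String) (bit : Char) : String × String :=
  let codigo_actual := st.2.push bit
  match pvBuscarA codigo_actual dicc with
  | some caracter => (st.1 ++ caracter, "")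
  | none => (st.1, codigo_actual)

def descomprimir (bits_comprimidos : String) (diccionario_codigos : List (String × String)) : String :=
  (bits_comprimidos.toList.foldl (pvPasoA diccionario_codigos) ("", "")).1

-- ===== PORT B =====
-- 'if codigo and codigo not in inverso: inverso[codigo] = caracter'
def pvInversoB (dicc : List (String × String)) : PySem.Dict String String :=
  dicc.foldl (fun d p =>
    if p.2 = "" then d else if d.contains p.2 then d else d.insert p.2 p.1) PySem.Dict.empty

-- 'for codigo in inverso: if len(codigo) > max_len: max_len = len(codigo)'
def pvMaxLen (inv : PySem.Dict String String) : Nat :=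
  inv.keys.foldl (fun m c => if c.toList.length > m then c.toList.length else m) 0

-- 'longitudes_presentes = {len(codigo) for codigo in inverso}' (consumed only by membership)
def pvLensSet (inv : PySem.Dict String String) : PySem.Set Nat :=
  PySem.Set.ofList (inv.keys.map (fun c => c.toList.length))

-- 'longitudes = [l for l in range(1, max_len + 1) if l in longitudes_presentes]'
def pvLens (inv : PySem.Dict String String) : List Nat :=
  (List.range' 1 (pvMaxLen inv)).filter (fun l => PySem.Set.contains (pvLensSet inv) l)

-- inner 'for l in longitudes: if i + l <= n: caracter = inverso.get(bits[i:i+l]) …'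
-- (bits[i:i+l] with natural in-range bounds is (bits.drop i).take l — PySem.List.slice_natCast_add)
def pvTryLens (inv : PySem.Dict String String) (bits : List Char) (i : Nat) :
    List Nat → Option (Nat × String)
  | [] => none
  | l :: ls =>
      if i + l ≤ bits.length then
        match inv.get? (String.ofList ((bits.drop i).take l)) with
        | some caracter => some (l, caracter)
        | none => pvTryLens inv bits i ls
      else pvTryLens inv bits i ls

-- needed by pvLoopB's termination proof
theorem pvTryLens_sound (inv : PySem.Dict String String) (bits : List Char) (i : Nat)
    (lens : List Nat) (l : Nat) (car : String)
    (h : pvTryLens inv bits i lens = some (l, car)) : l ∈ lens ∧ i + l ≤ bits.length := by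
  induction lens with
  | nil => simp [pvTryLens] at h
  | cons a ls ih =>
    simp only [pvTryLens] at h
    by_cases hle : i + a ≤ bits.length
    · simp only [hle, if_true] at h
      cases hg : inv.get? (String.ofList ((bits.drop i).take a)) with
      | some c => rw [hg] at h; simp at h; exact ⟨by simp [h.1], by omega⟩
      | none => rw [hg] at h; have := ih h; exact ⟨List.mem_cons_of_mem _ this.1, this.2⟩
    · simp only [hle, if_false] at h
      have := ih h; exact ⟨List.mem_cons_of_mem _ this.1, this.2⟩

-- needed by pvLoopB's termination proof
theorem pvLensPos (inv : PySem.Dict String String) : ∀ l ∈ pvLens inv, 1 ≤ l := by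
  intro l hl
  have := (List.mem_filter.mp hl).1
  have := (List.mem_range'_1.mp this).1
  omega

-- 'while i < n: …' over the jump index
def pvLoopB (inv : PySem.Dict String String) (bits : List Char) (lens : List Nat)
    (hpos : ∀ l ∈ lens, 1 ≤ l) (out : List String) (i : Nat) : List String :=
  if h : i < bits.length then
    match ht : pvTryLens inv bits i lens with
    | some lc => pvLoopB inv bits lens hpos (out ++ [lc.2]) (i + lc.1)
    | none => out
  else out
  termination_by bits.length - i
  decreasing_by
    have hs := pvTryLens_sound inv bits i lens lc.1 lc.2 (by simpa using ht)
    have := hpos _ hs.1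
    omega

def descomprimir_alt (bits_comprimidos : String) (diccionario_codigos : List (String × String)) : String :=
  PySem.Str.join "" (pvLoopB (pvInversoB diccionario_codigos) bits_comprimidos.toList
    (pvLens (pvInversoB diccionario_codigos)) (pvLensPos _) [] 0)

-- ===== PRECONDITION & SPEC =====
def Spec_descomprimir (bits_comprimidos : String) (diccionario_codigos : List (String × String)) (out : String) : Prop := out = descomprimir_alt bits_comprimidos diccionario_codigos
instance (bits_comprimidos : String) (diccionario_codigos : List (String × String)) (out : String) : Decidable (Spec_descomprimir bits_comprimidos diccionario_codigos out) := by unfold Spec_descomprimir; infer_instance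

-- ===== CLAIM (what is proved, stated in full; the proofs are below) =====
def Claim_equal_descomprimir : Prop := ∀ (bits_comprimidos : String) (diccionario_codigos : List (String × String)), Dom_descomprimir bits_comprimidos diccionario_codigos → Spec_descomprimir bits_comprimidos diccionario_codigos (descomprimir bits_comprimidos diccionario_codigos)

-- ===== LEMMAS AND PROOFS =====

-- reference decoder: A's future emissions given the pending buffer p
def pvGA (dicc : List (String × String)) : List Char → List Char → List String
  | _, [] => []
  | p, b :: r =>
      match pvBuscarA (String.ofList (p ++ [b])) dicc with
      | some car => car :: pvGA dicc [] r
      | none => pvGA dicc (p ++ [b]) r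

theorem pv_join_cons (a : String) (l : List String) :
    PySem.Str.join "" (a :: l) = a ++ PySem.Str.join "" l := by
  apply String.toList_inj.mp
  simp [PySem.Str.join, PySem.Chars.join, List.intercalate]
  induction l with
  | nil => simp
  | cons x r ih => cases r <;> simp_all [List.intersperse]

theorem pv_push_ofList (p : List Char) (b : Char) :
    (String.ofList p).push b = String.ofList (p ++ [b]) := by
  apply String.toList_inj.mp; simp

theorem pv_ofList_ne_empty (p : List Char) (hp : p ≠ []) : String.ofList p ≠ "" := by
  simp [← String.toList_inj, hp]

theorem pvA_fold (dicc : List (String × String)) (bits : List Char) :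
    ∀ (p : List Char) (s : String),
      (bits.foldl (pvPasoA dicc) (s, String.ofList p)).1
        = s ++ PySem.Str.join "" (pvGA dicc p bits) := by
  induction bits with
  | nil => intro p s; simp [pvGA, PySem.Str.join, PySem.Chars.join, List.intercalate]
  | cons b r ih =>
    intro p s
    rw [List.foldl_cons]
    cases hm : pvBuscarA (String.ofList (p ++ [b])) dicc with
    | some car =>
      have hstep : pvPasoA dicc (s, String.ofList p) b = (s ++ car, String.ofList []) := by
        simp only [pvPasoA, pv_push_ofList]
        rw [hm]
      have hGA : pvGA dicc p (b :: r) = car :: pvGA dicc [] r := by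
        simp only [pvGA]
        rw [hm]
      rw [hstep, ih [] (s ++ car), hGA, pv_join_cons, String.append_assoc]
    | none =>
      have hstep : pvPasoA dicc (s, String.ofList p) b = (s, String.ofList (p ++ [b])) := by
        simp only [pvPasoA, pv_push_ofList]
        rw [hm]
      have hGA : pvGA dicc p (b :: r) = pvGA dicc (p ++ [b]) r := by
        simp only [pvGA]
        rw [hm]
      rw [hstep, ih (p ++ [b]) s, hGA]

theorem pv_inv_aux (c : String) (hc : c ≠ "") :
    ∀ (l : List (String × String)) (d : PySem.Dict String String),
      (l.foldl (fun d p =>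
          if p.2 = "" then d else if d.contains p.2 then d else d.insert p.2 p.1) d).get? c
        = ((d.get? c).orElse (fun _ => pvBuscarA c l)) := by
  intro l
  induction l with
  | nil =>
    intro d; simp only [List.foldl_nil, pvBuscarA]
    cases d.get? c <;> rfl
  | cons p resto ih =>
    intro d
    simp only [List.foldl_cons]
    by_cases hz : p.2 = ""
    · have hne : (("" : String) == c) = false := by
        rw [beq_eq_false_iff_ne]
        exact fun h => hc h.symm
      have hb : pvBuscarA c (p :: resto) = pvBuscarA c resto := by
        rcases p with ⟨a1, a2⟩
        simp only at hz
        subst hz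
        simp only [pvBuscarA, hne, Bool.false_eq_true, if_false]
      simp only [hz, if_true, ih, hb]
    · simp only [hz, if_false]
      by_cases hcon : d.contains p.2 = true
      · simp only [hcon, if_true, ih]
        by_cases hpc : p.2 = c
        · have hs : (d.get? c).isSome := by
            rw [← hpc, ← PySem.Dict.contains_eq_isSome_get?]; exact hcon
          cases hg : d.get? c with
          | none => simp [hg] at hs
          | some v => simp [Option.orElse]
        · have hne : (p.2 == c) = false := by simpa using hpc
          simp [pvBuscarA, hne]
      · simp only [hcon, if_false, ih]
        by_cases hpc : p.2 = c
        · subst hpc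
          have hg : d.get? p.2 = none := by
            rw [PySem.Dict.get?_eq_none_iff_contains]; simpa using hcon
          simp [PySem.Dict.get?_insert_self, pvBuscarA, hg, Option.orElse]
        · have hne : c ≠ p.2 := fun he => hpc he.symm
          have hbe : (p.2 == c) = false := by simpa using hpc
          simp [PySem.Dict.get?_insert_of_ne d _ hne, pvBuscarA, hbe]

theorem pv_get?_inversoB (dicc : List (String × String)) (c : String) (hc : c ≠ "") :
    (pvInversoB dicc).get? c = pvBuscarA c dicc := by
  unfold pvInversoB
  rw [pv_inv_aux c hc]
  rfl

theorem pv_len_le_maxLen (inv : PySem.Dict String String) (c : String) (hc : c ∈ inv.keys) :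
    c.toList.length ≤ pvMaxLen inv := by
  unfold pvMaxLen
  rw [PySem.List.foldl_congr_mem inv.keys _
        (fun m s => max m s.toList.length) 0 ?_]
  · exact (PySem.List.le_foldl_max_nat inv.keys (fun s => s.toList.length) 0).2 c hc
  · intro acc x _
    rcases Nat.lt_or_ge acc x.toList.length with h | h
    · rw [if_pos (by omega)]; exact (Nat.max_eq_right h.le).symm
    · rw [if_neg (by omega)]; exact (Nat.max_eq_left h).symm

theorem pv_mem_lens (inv : PySem.Dict String String) (c : String) (hc : c ∈ inv.keys)
    (h1 : 1 ≤ c.toList.length) : c.toList.length ∈ pvLens inv := by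
  unfold pvLens
  rw [List.mem_filter]
  refine ⟨List.mem_range'_1.mpr ⟨h1, by have := pv_len_le_maxLen inv c hc; omega⟩, ?_⟩
  have : c.toList.length ∈ pvLensSet inv := by
    unfold pvLensSet
    rw [PySem.Set.mem_ofList]
    exact List.mem_map.mpr ⟨c, hc, rfl⟩
  simpa [PySem.Set.contains] using this

theorem pv_lens_pairwise (inv : PySem.Dict String String) : (pvLens inv).Pairwise (· < ·) :=
  List.Pairwise.filter _ List.pairwise_lt_range'

theorem pvTryLens_none (inv : PySem.Dict String String) (bits : List Char) (i : Nat)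
    (lens : List Nat)
    (h : ∀ l ∈ lens, i + l ≤ bits.length →
          inv.get? (String.ofList ((bits.drop i).take l)) = none) :
    pvTryLens inv bits i lens = none := by
  induction lens with
  | nil => rfl
  | cons a ls ih =>
    simp only [pvTryLens]
    by_cases hle : i + a ≤ bits.length
    · rw [if_pos hle, h a (List.mem_cons_self) hle]
      exact ih (fun l hl => h l (List.mem_cons_of_mem _ hl))
    · rw [if_neg hle]
      exact ih (fun l hl => h l (List.mem_cons_of_mem _ hl))

theorem pvTryLens_first (inv : PySem.Dict String String) (bits : List Char) (i : Nat)
    (lens : List Nat) (hpw : lens.Pairwise (· < ·)) (l0 : Nat) (car : String)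
    (hmem : l0 ∈ lens) (hle : i + l0 ≤ bits.length)
    (hhit : inv.get? (String.ofList ((bits.drop i).take l0)) = some car)
    (hlow : ∀ l ∈ lens, l < l0 → i + l ≤ bits.length →
              inv.get? (String.ofList ((bits.drop i).take l)) = none) :
    pvTryLens inv bits i lens = some (l0, car) := by
  induction lens with
  | nil => simp at hmem
  | cons a ls ih =>
    have hpw' := (List.pairwise_cons.mp hpw)
    simp only [pvTryLens]
    rcases List.mem_cons.mp hmem with ha | hls
    · subst ha
      rw [if_pos hle, hhit]
    · have halt : a < l0 := hpw'.1 l0 hls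
      by_cases hle2 : i + a ≤ bits.length
      · rw [if_pos hle2, hlow a List.mem_cons_self halt hle2]
        exact ih hpw'.2 hls (fun l hl => hlow l (List.mem_cons_of_mem _ hl))
      · rw [if_neg hle2]
        exact ih hpw'.2 hls (fun l hl => hlow l (List.mem_cons_of_mem _ hl))

theorem pvB_key (dicc : List (String × String)) (bits : List Char) :
    ∀ (rest p : List Char) (i : Nat) (out : List String),
      bits.drop i = p ++ rest →
      (∀ k, 1 ≤ k → k ≤ p.length → pvBuscarA (String.ofList (p.take k)) dicc = none) →
      pvLoopB (pvInversoB dicc) bits (pvLens (pvInversoB dicc)) (pvLensPos _) out i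
        = out ++ pvGA dicc p rest := by
  intro rest
  induction rest with
  | nil =>
    intro p i out hdrop hfail
    rw [pvLoopB]
    simp only [pvGA, List.append_nil]
    by_cases hi : i < bits.length
    · have hnone : pvTryLens (pvInversoB dicc) bits i (pvLens (pvInversoB dicc)) = none := by
        apply pvTryLens_none
        intro l hl hle
        have hl1 := pvLensPos _ l hl
        have hplen : (bits.drop i).length = p.length := by rw [hdrop]; simp
        have hld : (bits.drop i).length = bits.length - i := by simp
        have hlp : l ≤ p.length := by omega
        rw [hdrop, List.append_nil]
        have hne : p.take l ≠ [] := by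
          have : (p.take l).length = l := by simp; omega
          intro h0; rw [h0] at this; simp at this; omega
        rw [pv_get?_inversoB dicc _ (pv_ofList_ne_empty _ hne)]
        exact hfail l hl1 hlp
      rw [dif_pos hi]
      split
      · rename_i lc heq; rw [hnone] at heq; cases heq
      · rfl
    · rw [dif_neg hi]
  | cons b r ih =>
    intro p i out hdrop hfail
    cases hm : pvBuscarA (String.ofList (p ++ [b])) dicc with
    | none =>
      have hgoal : pvGA dicc p (b :: r) = pvGA dicc (p ++ [b]) r := by
        simp only [pvGA, hm]
      rw [hgoal]
      apply ih (p ++ [b]) i out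
      · rw [hdrop]; simp
      · intro k hk1 hk2
        simp only [List.length_append, List.length_cons, List.length_nil] at hk2
        by_cases hkp : k ≤ p.length
        · rw [List.take_append_of_le_length hkp]
          exact hfail k hk1 hkp
        · have hk : k = p.length + 1 := by omega
          have : (p ++ [b]).take k = p ++ [b] := by
            apply List.take_of_length_le; simp; omega
          rw [this]; exact hm
    | some car =>
      have hi : i < bits.length := by
        by_contra hni
        have : bits.drop i = [] := List.drop_eq_nil_iff.mpr (by omega)
        rw [hdrop] at this; simp at this
      have hlen : bits.length - i = p.length + 1 + r.length := by
        have h1 : (bits.drop i).length = bits.length - i := by simp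
        rw [hdrop] at h1; simp at h1; omega
      have htake : (bits.drop i).take (p.length + 1) = p ++ [b] := by
        rw [hdrop, show p ++ b :: r = (p ++ [b]) ++ r by simp]
        have : p.length + 1 = (p ++ [b]).length := by simp
        rw [this, List.take_left]
      have hget : (pvInversoB dicc).get? (String.ofList ((bits.drop i).take (p.length + 1)))
          = some car := by
        rw [htake, pv_get?_inversoB dicc _ (pv_ofList_ne_empty _ (by simp))]
        exact hm
      have hkey : String.ofList (p ++ [b]) ∈ (pvInversoB dicc).keys := by
        apply (PySem.Dict.contains_iff_mem_keys _ _).mp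
        rw [PySem.Dict.contains_eq_isSome_get?]
        rw [pv_get?_inversoB dicc _ (pv_ofList_ne_empty _ (by simp)), hm]
        rfl
      have hlmem : p.length + 1 ∈ pvLens (pvInversoB dicc) := by
        have := pv_mem_lens (pvInversoB dicc) (String.ofList (p ++ [b])) hkey (by simp)
        simpa using this
      have hlow : ∀ l ∈ pvLens (pvInversoB dicc), l < p.length + 1 → i + l ≤ bits.length →
          (pvInversoB dicc).get? (String.ofList ((bits.drop i).take l)) = none := by
        intro l hl hlt hle
        have hl1 := pvLensPos _ l hl
        have hlp : l ≤ p.length := by omega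
        rw [hdrop, List.take_append_of_le_length hlp]
        have hne : p.take l ≠ [] := by
          have : (p.take l).length = l := by simp; omega
          intro h0; rw [h0] at this; simp at this; omega
        rw [pv_get?_inversoB dicc _ (pv_ofList_ne_empty _ hne)]
        exact hfail l hl1 hlp
      have htry : pvTryLens (pvInversoB dicc) bits i (pvLens (pvInversoB dicc))
          = some (p.length + 1, car) :=
        pvTryLens_first _ _ _ _ (pv_lens_pairwise _) _ _ hlmem (by omega) hget hlow
      have hGA : pvGA dicc p (b :: r) = car :: pvGA dicc [] r := by
        simp only [pvGA]
        rw [hm]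
      rw [pvLoopB, dif_pos hi]
      have hdrop2 : bits.drop (i + (p.length + 1)) = [] ++ r := by
        have : bits.drop (i + (p.length + 1)) = (bits.drop i).drop (p.length + 1) := by
          rw [List.drop_drop]
          try ring_nf
        rw [this, hdrop, show p ++ b :: r = (p ++ [b]) ++ r by simp,
          show p.length + 1 = (p ++ [b]).length by simp, List.drop_left]
        rfl
      split
      · rename_i lc heq
        rw [htry] at heq
        cases heq
        rw [ih [] (i + (p.length + 1)) (out ++ [car]) hdrop2
          (by intro k hk1 hk2; simp only [List.length_nil] at hk2; omega), hGA]
        simp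
      · rename_i heq
        rw [htry] at heq
        cases heq

-- ===== VERDICT (by name: the statement is the Claim_ definition above) =====
theorem descomprimir_spec : Claim_equal_descomprimir := by
  intro bits dicc _
  unfold Spec_descomprimir descomprimir descomprimir_alt
  have hA : (bits.toList.foldl (pvPasoA dicc) ("", "")).1
      = "" ++ PySem.Str.join "" (pvGA dicc [] bits.toList) := pvA_fold dicc bits.toList [] ""
  have hB := pvB_key dicc bits.toList bits.toList [] 0 []
    (by simp) (by intro k hk1 hk2; simp only [List.length_nil] at hk2; omega)
  simp only [List.nil_append] at hB
  rw [hA, hB]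
  simp
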